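-- pv_equiv track=rewrite | github.com/fkulic/advent-of-code | 2015/day11.py | increment_str
-- ===== SOURCE A (Python) =====
-- def increment_str(a: str) -> str:
--     for l in "iol":
--         if (i := a.find(l)) != -1:
--             return a[:i] + chr(ord(l) + 1) + "a" * (len(a) - i - 1)
--     l_a = []
--     for i, c in enumerate(a[::-1]):
--         was_z = False
--         if c == "z":
--             l_a.append("a")
--             was_z = True
--         else:
--             l_a.append(chr(ord(c) + 1))
--         if not was_z:
--             return a[: len(a) - i - 1] + "".join(reversed(l_a))
--     return ""
-- ===== SOURCE B (Python) =====
-- def increment_str(a: str) -> str: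
--     for l in "iol":
--         if l in a:
--             i = a.index(l)
--             return a[:i] + chr(ord(l) + 1) + "a" * (len(a) - i - 1)
--     base = a.rstrip("z")
--     if not base:
--         return ""
--     return base[:-1] + chr(ord(base[-1]) + 1) + "a" * (len(a) - len(base))
-- ===== Notes on version B (the rewrite author's own statement) =====
-- stated objective: simpler
-- what changed: The right-to-left carry loop that accumulates a reversed character list is replaced by a boundary computation: rstrip the trailing run of the last alphabet letter, increment the final remaining character and pad back to length; the forbidden-letter scan keeps the i/o/l priority but uses membership plus index instead of find with a -1 sentinel.
import Mathlib
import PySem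

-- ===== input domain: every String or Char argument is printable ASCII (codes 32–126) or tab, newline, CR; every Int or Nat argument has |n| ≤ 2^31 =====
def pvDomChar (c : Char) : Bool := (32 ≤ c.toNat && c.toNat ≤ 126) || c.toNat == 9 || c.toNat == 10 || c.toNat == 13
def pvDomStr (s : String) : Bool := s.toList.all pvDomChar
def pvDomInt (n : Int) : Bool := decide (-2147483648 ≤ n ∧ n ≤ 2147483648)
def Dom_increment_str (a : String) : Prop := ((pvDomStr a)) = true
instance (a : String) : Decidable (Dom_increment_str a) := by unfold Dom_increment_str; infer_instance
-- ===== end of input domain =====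

-- B replaces A's right-to-left carry loop (reversed accumulator list) with an rstrip-based
-- boundary computation; objective: simpler.

-- ===== PORT A =====

-- chr(ord(c) + 1)
def pvSucc (c : Char) : Char := Char.ofNat (c.toNat + 1)

-- A's 'for l in "iol"' loop: returns some result on the first l with a.find(l) != -1
def incAForbidden (s : List Char) : List Char → Option (List Char)
  | [] => none
  | l :: ls =>
    let i := PySem.Chars.find s [l]
    if i ≠ -1 then
      some (PySem.List.slice s none (some i) ++ [pvSucc l] ++
            PySem.List.pyRepeat ['a'] ((s.length : Int) - i - 1))
    else incAForbidden s ls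

-- A's 'for i, c in enumerate(a[::-1])' loop; rev is the remaining reversed input,
-- la is l_a so far, i the enumerate counter; falling off the end gives "" (as [])
def incACarry (s : List Char) : List Char → List Char → Nat → List Char
  | [], _, _ => []
  | c :: rest, la, i =>
    if c = 'z' then incACarry s rest (la ++ ['a']) (i + 1)
    else PySem.List.slice s none (some ((s.length : Int) - i - 1)) ++ (la ++ [pvSucc c]).reverse

def increment_str (a : String) : String :=
  match incAForbidden a.toList ['i', 'o', 'l'] with
  | some r => String.ofList r
  | none =>
    -- a[::-1] is a.toList.reverse (PySem.List.slice?_none_none_neg_one)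
    String.ofList (incACarry a.toList a.toList.reverse [] 0)

-- ===== PORT B =====

-- B's 'for l in "iol"' loop: 'if l in a: i = a.index(l)'
def incBForbidden (s : List Char) : List Char → Option (List Char)
  | [] => none
  | l :: ls =>
    if PySem.Chars.isIn [l] s then
      match PySem.List.index? s l with
      | some i => some (s.take i ++ [pvSucc l] ++ List.replicate (s.length - i - 1) 'a')
      | none => none   -- unreachable: a.index(l) cannot raise after 'l in a'
    else incBForbidden s ls

-- base = a.rstrip("z") (exact for this fixed character set), then B's boundary expression;
-- base[-1] ported as getLastD (guarded by the nonemptiness test, as Python's is)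
def incBCarry (s : List Char) : List Char :=
  let base := (s.reverse.dropWhile (· == 'z')).reverse
  if base = [] then []
  else base.dropLast ++ [pvSucc (base.getLastD 'a')] ++ List.replicate (s.length - base.length) 'a'

def increment_str_alt (a : String) : String :=
  match incBForbidden a.toList ['i', 'o', 'l'] with
  | some r => String.ofList r
  | none => String.ofList (incBCarry a.toList)

-- ===== PRECONDITION & SPEC =====
def Spec_increment_str (a : String) (out : String) : Prop := out = increment_str_alt a
instance (a : String) (out : String) : Decidable (Spec_increment_str a out) := by unfold Spec_increment_str; infer_instance

-- ===== CLAIM (what is proved, stated in full; the proofs are below) =====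
def Claim_equal_increment_str : Prop := ∀ (a : String), Dom_increment_str a → Spec_increment_str a (increment_str a)

-- ===== LEMMAS AND PROOFS =====

-- a.find(l) for a single character l points at the first occurrence, i.e. a.index(l)
lemma index?_of_find_singleton (s : List Char) (l : Char)
    (h : PySem.Chars.find s [l] ≠ -1) :
    PySem.List.index? s l = some (PySem.Chars.find s [l]).toNat := by
  have hnn : 0 ≤ PySem.Chars.find s [l] := by
    have := PySem.Chars.neg_one_le_find s [l]; omega
  obtain ⟨hpre, hmin⟩ := PySem.Chars.find_spec (s := s) (sub := [l]) hnn
  set k := (PySem.Chars.find s [l]).toNat with hk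
  obtain ⟨t, ht⟩ := hpre
  simp only [List.singleton_append] at ht
  have hklen : k < s.length := by
    by_contra hge
    rw [List.drop_eq_nil_of_le (by omega)] at ht
    simp at ht
  rw [PySem.List.index?_eq_some_iff]
  refine ⟨s.take k, t, ?_, by simp [hklen.le], ?_⟩
  · conv_lhs => rw [← List.take_append_drop k s]
    rw [← ht]
  · intro hmem
    obtain ⟨j, hj, hsj⟩ := List.mem_iff_getElem.mp hmem
    have hj' : j < k ∧ j < s.length := by simpa using hj
    have hjk : j < k := hj'.1
    have hjlen : j < s.length := by omega
    apply hmin j hjk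
    refine ⟨s.drop (j+1), ?_⟩
    rw [List.singleton_append, List.drop_eq_getElem_cons hjlen]
    congr 1
    rw [← hsj, List.getElem_take]

-- the two forbidden-letter loops agree
lemma forbidden_eq (s : List Char) (ls : List Char) :
    incAForbidden s ls = incBForbidden s ls := by
  induction ls with
  | nil => rfl
  | cons l ls ih =>
    simp only [incAForbidden, incBForbidden]
    by_cases h : PySem.Chars.find s [l] = -1
    · have hin : PySem.Chars.isIn [l] s = false := by
        rw [PySem.Chars.isIn_eq_false_iff]
        exact (PySem.Chars.find_eq_neg_one_iff s [l]).mp h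
      simp [h, hin, ih]
    · have hin : PySem.Chars.isIn [l] s = true := by
        rw [PySem.Chars.isIn_iff_infix]
        exact (PySem.Chars.find_ne_neg_one_iff s [l]).mp h
      have hidx := index?_of_find_singleton s l h
      have hnn : 0 ≤ PySem.Chars.find s [l] := by
        have := PySem.Chars.neg_one_le_find s [l]; omega
      have hle := PySem.Chars.find_le_length s [l]
      have harith : ((s.length : Int) - PySem.Chars.find s [l] - 1).toNat
          = s.length - (PySem.Chars.find s [l]).toNat - 1 := by omega
      simp only [hin, if_true, hidx, PySem.List.slice_to s hnn,
        PySem.List.pyRepeat_singleton, harith]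
      rw [if_pos (by simp [h])]

-- A's carry loop, started with i 'z's already consumed, equals B's boundary computation
lemma carry_eq_aux (rev : List Char) : ∀ (i : Nat) (s : List Char),
    s.reverse = List.replicate i 'z' ++ rev →
    incACarry s rev (List.replicate i 'a') i = incBCarry s := by
  induction rev with
  | nil =>
    intro i s hs
    have hs' : s = List.replicate i 'z' := by
      have := congrArg List.reverse hs; simpa using this
    subst hs'
    simp [incACarry, incBCarry]
  | cons c rest ih =>
    intro i s hs
    have hsform : s = (rest.reverse ++ [c]) ++ List.replicate i 'z' := by
      have := congrArg List.reverse hs; simpa using this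
    by_cases hc : c = 'z'
    · subst hc
      simp only [incACarry]
      rw [← List.replicate_succ']
      apply ih
      rw [hs, List.replicate_succ']
      simp
    · have hlen : s.length = rest.length + 1 + i := by
        subst hsform; simp; omega
      have hInt : ((s.length : Int) - i - 1) = ((rest.length : Nat) : Int) := by
        rw [hlen]; push_cast; ring
      simp only [incACarry, if_neg hc, hInt, PySem.List.slice_to_natCast]
      have htake : s.take rest.length = rest.reverse := by
        rw [hsform, List.append_assoc]
        have : rest.length = rest.reverse.length := by simp
        rw [this, List.take_left]
      rw [htake]
      unfold incBCarry
      rw [hs]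
      simp only [List.dropWhile_append]
      simp [hc, hlen]

-- ===== VERDICT (by name: the statement is the Claim_ definition above) =====
theorem increment_str_spec : Claim_equal_increment_str := by
  intro a _
  unfold Spec_increment_str increment_str increment_str_alt
  rw [forbidden_eq]
  cases incBForbidden a.toList ['i', 'o', 'l'] with
  | some r => rfl
  | none =>
    have h := carry_eq_aux a.toList.reverse 0 a.toList (by simp)
    simp only [List.replicate_zero] at h
    rw [h]
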